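-- pv_equiv track=rewrite | github.com/valbaca/advent-py | advent/year2020/day20.py | all_arrangements
-- ===== SOURCE A (Python) =====
-- def rotate(image):
--     rotated = [row[:] for row in image]
--     for r in range(len(image)):
--         rotated[r] = ''.join(reversed([image[i][r] for i in range(len(image))]))
--     return rotated
--
-- def flip(image):
--     return [''.join(reversed(row)) for row in image]
--
-- def all_arrangements(image):
--     arr = [image]
--     for _ in range(3):
--         arr.append(rotate(arr[-1]))
--     arr.append(flip(image))
--     for _ in range(3):
--         arr.append(rotate(arr[-1]))
--     return arr
-- ===== SOURCE B (Python) =====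
-- def all_arrangements(image):
--     n = len(image)
--     fr = [row[::-1] for row in image]
--
--     def grid(src, f):
--         return [''.join(src[f(r, c)[0]][f(r, c)[1]] for c in range(n)) for r in range(n)]
--
--     return [
--         image,
--         grid(image, lambda r, c: (n - 1 - c, r)),
--         grid(image, lambda r, c: (n - 1 - r, n - 1 - c)),
--         grid(image, lambda r, c: (c, n - 1 - r)),
--         fr,
--         grid(fr, lambda r, c: (n - 1 - c, r)),
--         grid(fr, lambda r, c: (n - 1 - r, n - 1 - c)),
--         grid(fr, lambda r, c: (c, n - 1 - r)),
--     ]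
-- ===== Notes on version B (the rewrite author's own statement) =====
-- stated objective: alternative
-- what changed: B produces each of the 8 symmetry grids independently via direct coordinate maps out[r][c]=src[f(r,c)] over the original image and its row-reversed copy, instead of A's chain of rotate-of-the-previous-result.
import Mathlib
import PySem

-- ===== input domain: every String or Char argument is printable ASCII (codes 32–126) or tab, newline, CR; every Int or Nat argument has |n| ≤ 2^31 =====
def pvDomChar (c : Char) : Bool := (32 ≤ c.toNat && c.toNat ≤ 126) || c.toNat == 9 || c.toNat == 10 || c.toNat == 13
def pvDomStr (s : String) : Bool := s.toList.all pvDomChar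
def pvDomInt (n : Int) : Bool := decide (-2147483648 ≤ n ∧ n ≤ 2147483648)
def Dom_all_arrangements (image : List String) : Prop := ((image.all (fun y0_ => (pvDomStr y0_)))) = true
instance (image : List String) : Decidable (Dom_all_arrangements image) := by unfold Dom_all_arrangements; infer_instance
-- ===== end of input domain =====

-- B builds the 8 symmetry grids independently via direct coordinate maps instead of A's
-- chain of rotate-of-the-previous-result (objective: alternative decomposition, same cost).

-- ===== PORT A =====
-- image[i][r] (both indices nonnegative and in range under Pre_): out-of-range falls back
-- to a default that Pre_ makes unreachable (Python raises IndexError there).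
def pvRotate (image : List String) : List String :=
  let n := image.length
  (List.range n).map (fun r =>
    String.ofList (((List.range n).map (fun i => (image.getD i "").toList.getD r ' ')).reverse))

def pvFlip (image : List String) : List String :=
  image.map (fun row => String.ofList row.toList.reverse)

def all_arrangements (image : List String) : List (List String) :=
  let arr := (List.range 3).foldl (fun a _ => a ++ [pvRotate (a.getLastD [])]) [image]
  let arr := arr ++ [pvFlip image]
  (List.range 3).foldl (fun a _ => a ++ [pvRotate (a.getLastD [])]) arr

-- ===== PORT B =====
def pvRowRev (row : String) : String := String.ofList row.toList.reverse

def pvAt (src : List String) (p : Nat × Nat) : Char := (src.getD p.1 "").toList.getD p.2 ' '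

def pvGrid (src : List String) (n : Nat) (f : Nat → Nat → Nat × Nat) : List String :=
  (List.range n).map (fun r => String.ofList ((List.range n).map (fun c => pvAt src (f r c))))

def all_arrangements_alt (image : List String) : List (List String) :=
  let n := image.length
  let fr := image.map pvRowRev
  [image,
   pvGrid image n (fun r c => (n - 1 - c, r)),
   pvGrid image n (fun r c => (n - 1 - r, n - 1 - c)),
   pvGrid image n (fun r c => (c, n - 1 - r)),
   fr,
   pvGrid fr n (fun r c => (n - 1 - c, r)),
   pvGrid fr n (fun r c => (n - 1 - r, n - 1 - c)),
   pvGrid fr n (fun r c => (c, n - 1 - r))]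

-- ===== PRECONDITION & SPEC =====
-- Pre_ excludes exactly the inputs where the Pythons raise IndexError: some row shorter
-- than the number of rows (rotate reads image[i][r] for r < len(image)).
def Pre_all_arrangements (image : List String) : Prop :=
  ∀ row ∈ image, image.length ≤ row.toList.length
instance (image : List String) : Decidable (Pre_all_arrangements image) := by
  unfold Pre_all_arrangements; infer_instance
def pvWitness_all_arrangements : List String := ["ab", "cd"]

def Spec_all_arrangements (image : List String) (out : List (List String)) : Prop := out = all_arrangements_alt image
instance (image : List String) (out : List (List String)) : Decidable (Spec_all_arrangements image out) := by unfold Spec_all_arrangements; infer_instance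

-- ===== CLAIM (what is proved, stated in full; the proofs are below) =====
def Claim_equal_all_arrangements : Prop := ∀ (image : List String), Dom_all_arrangements image → Pre_all_arrangements image → Spec_all_arrangements image (all_arrangements image)

-- ===== LEMMAS AND PROOFS =====

-- reversing a map over range reindexes by n-1-c
theorem pvRevMapRange (g : Nat → Char) (n : Nat) :
    ((List.range n).map g).reverse = (List.range n).map (fun c => g (n - 1 - c)) := by
  apply List.ext_getElem <;> simp

theorem pvGrid_length (src : List String) (n : Nat) (f : Nat → Nat → Nat × Nat) :
    (pvGrid src n f).length = n := by simp [pvGrid]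

theorem pvGrid_congr (src : List String) (n : Nat) (f g : Nat → Nat → Nat × Nat)
    (h : ∀ r c, r < n → c < n → f r c = g r c) : pvGrid src n f = pvGrid src n g := by
  unfold pvGrid
  refine List.map_congr_left (fun r hr => ?_)
  congr 1
  refine List.map_congr_left (fun c hc => ?_)
  rw [h r c (List.mem_range.mp hr) (List.mem_range.mp hc)]

-- A's hand-written rotate is the coordinate map (r,c) ↦ (n-1-c, r)
theorem pvRotate_eq_grid (src : List String) :
    pvRotate src = pvGrid src src.length (fun r c => (src.length - 1 - c, r)) := by
  unfold pvRotate pvGrid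
  refine List.map_congr_left (fun r _ => ?_)
  rw [pvRevMapRange]
  rfl

-- rotating a grid composes coordinate maps
theorem pvRotate_grid (src : List String) (n : Nat) (f : Nat → Nat → Nat × Nat) :
    pvRotate (pvGrid src n f) = pvGrid src n (fun r c => f (n - 1 - c) r) := by
  rw [pvRotate_eq_grid, pvGrid_length]
  unfold pvGrid
  refine List.map_congr_left (fun r hr => ?_)
  congr 1
  refine List.map_congr_left (fun c hc => ?_)
  have hr' := List.mem_range.mp hr
  have hc' := List.mem_range.mp hc
  show pvAt ((List.range n).map
      (fun r => String.ofList ((List.range n).map (fun c => pvAt src (f r c))))) (n - 1 - c, r)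
    = pvAt src (f (n - 1 - c) r)
  unfold pvAt
  rw [PySem.List.getD_map_range _ n (n - 1 - c) _ (by omega)]
  rw [String.toList_ofList]
  rw [PySem.List.getD_map_range _ n r _ hr']

theorem pvFlip_eq (image : List String) : pvFlip image = image.map pvRowRev := rfl

-- ===== VERDICT (by name: the statement is the Claim_ definition above) =====
theorem all_arrangements_spec : Claim_equal_all_arrangements := by
  intro image _ _
  show all_arrangements image = all_arrangements_alt image
  have hA : all_arrangements image =
      [image,
       pvRotate image,
       pvRotate (pvRotate image),
       pvRotate (pvRotate (pvRotate image)),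
       pvFlip image,
       pvRotate (pvFlip image),
       pvRotate (pvRotate (pvFlip image)),
       pvRotate (pvRotate (pvRotate (pvFlip image)))] := rfl
  rw [hA]
  show _ = [image,
   pvGrid image image.length (fun r c => (image.length - 1 - c, r)),
   pvGrid image image.length (fun r c => (image.length - 1 - r, image.length - 1 - c)),
   pvGrid image image.length (fun r c => (c, image.length - 1 - r)),
   image.map pvRowRev,
   pvGrid (image.map pvRowRev) image.length (fun r c => (image.length - 1 - c, r)),
   pvGrid (image.map pvRowRev) image.length (fun r c => (image.length - 1 - r, image.length - 1 - c)),
   pvGrid (image.map pvRowRev) image.length (fun r c => (c, image.length - 1 - r))]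
  set n := image.length with hn
  have hfr : pvFlip image = image.map pvRowRev := pvFlip_eq image
  have hfrlen : (image.map pvRowRev).length = n := by simp [hn]
  have h1 : pvRotate image = pvGrid image n (fun r c => (n - 1 - c, r)) :=
    pvRotate_eq_grid image
  have h2 : pvRotate (pvRotate image)
      = pvGrid image n (fun r c => (n - 1 - r, n - 1 - c)) := by
    rw [h1, pvRotate_grid]
  have h3 : pvRotate (pvRotate (pvRotate image))
      = pvGrid image n (fun r c => (c, n - 1 - r)) := by
    rw [h2, pvRotate_grid]
    exact pvGrid_congr _ _ _ _ (by intro r c hr hc; simp; omega)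
  have h5 : pvRotate (pvFlip image)
      = pvGrid (image.map pvRowRev) n (fun r c => (n - 1 - c, r)) := by
    rw [hfr]
    rw [pvRotate_eq_grid, hfrlen]
  have h6 : pvRotate (pvRotate (pvFlip image))
      = pvGrid (image.map pvRowRev) n (fun r c => (n - 1 - r, n - 1 - c)) := by
    rw [h5, pvRotate_grid]
  have h7 : pvRotate (pvRotate (pvRotate (pvFlip image)))
      = pvGrid (image.map pvRowRev) n (fun r c => (c, n - 1 - r)) := by
    rw [h6, pvRotate_grid]
    exact pvGrid_congr _ _ _ _ (by intro r c hr hc; simp; omega)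
  rw [h3, h2, h1, h7, h6, h5, hfr]
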